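-- pv_equiv track=rewrite | github.com/devKarin/beginner_python | EX/ex09_recursion/meta.py | apply_dragon_rules
-- ===== SOURCE A (Python) =====
-- def apply_dragon_rules(string):
--     """
--     Write a recursive function which replaces characters in string.
--
--     Examples:
--         "a" -> "aRbFR"
--         "b" -> "LFaLb"
--     apply_dragon_rules("a") -> "aRbFR"
--     apply_dragon_rules("aa") -> "aRbFRaRbFR"
--     apply_dragon_rules("FRaFRb") -> "FRaRbFRFRLFaLb"
--
--     :param string: sentence with "a" and "b" characters that need to be replaced
--     :return: new sentence with "a" and "b" characters replaced
--     """
--     sentence = ""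
--     if len(string) <= 0:
--         return ""
--     if string[-1] == "a":
--         sentence += apply_dragon_rules(string[:-1]) + "aRbFR"
--     elif string[-1] == "b":
--         sentence += apply_dragon_rules(string[:-1]) + "LFaLb"
--     else:
--         sentence += apply_dragon_rules(string[:-1]) + string[-1]
--     return sentence
-- ===== SOURCE B (Python) =====
-- def apply_dragon_rules(string):
--     sentence = ""
--     for c in string:
--         if c == "a":
--             sentence += "aRbFR"
--         elif c == "b":
--             sentence += "LFaLb"
--         else:
--             sentence += c
--     return sentence
-- ===== Notes on version B (the rewrite author's own statement) =====
-- stated objective: faster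
-- what changed: Replaces the last-character-peeling recursion (which builds O(n) sliced copies, quadratic total) with a single front-to-back iterative loop accumulating the result, keeping the explicit three-way branch.
import Mathlib
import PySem

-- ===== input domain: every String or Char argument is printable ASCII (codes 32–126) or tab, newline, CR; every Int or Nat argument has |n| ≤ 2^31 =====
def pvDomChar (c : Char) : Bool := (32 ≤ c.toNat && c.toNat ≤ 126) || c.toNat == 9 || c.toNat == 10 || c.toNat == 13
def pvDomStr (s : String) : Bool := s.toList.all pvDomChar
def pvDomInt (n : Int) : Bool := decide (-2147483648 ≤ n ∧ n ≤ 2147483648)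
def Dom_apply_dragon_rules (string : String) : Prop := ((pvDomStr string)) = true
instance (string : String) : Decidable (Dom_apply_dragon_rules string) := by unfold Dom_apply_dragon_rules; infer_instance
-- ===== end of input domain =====

-- B replaces A's last-character recursion by a single front-to-back iterative loop (simpler decomposition, same values).

-- ===== PORT A =====
-- A peels the LAST character (string[-1]) and recurses on string[:-1].
def pvAGo (l : List Char) : String :=
  if h : l.length ≤ 0 then ""
  else
    let last := l.getLast (by intro h'; simp [h'] at h)
    if last = 'a' then pvAGo l.dropLast ++ "aRbFR"
    else if last = 'b' then pvAGo l.dropLast ++ "LFaLb"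
    else pvAGo l.dropLast ++ String.singleton last
termination_by l.length
decreasing_by all_goals · simp only [List.length_dropLast]; omega

def apply_dragon_rules (string : String) : String := pvAGo string.toList

-- ===== PORT B =====
-- B: iterate front to back, appending to an accumulator with the same three-way branch.
def apply_dragon_rules_alt (string : String) : String :=
  string.toList.foldl
    (fun sentence c =>
      if c = 'a' then sentence ++ "aRbFR"
      else if c = 'b' then sentence ++ "LFaLb"
      else sentence ++ String.singleton c) ""

-- ===== PRECONDITION & SPEC =====
def Spec_apply_dragon_rules (string : String) (out : String) : Prop := out = apply_dragon_rules_alt string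
instance (string : String) (out : String) : Decidable (Spec_apply_dragon_rules string out) := by unfold Spec_apply_dragon_rules; infer_instance

-- ===== CLAIM (what is proved, stated in full; the proofs are below) =====
def Claim_equal_apply_dragon_rules : Prop := ∀ (string : String), Dom_apply_dragon_rules string → Spec_apply_dragon_rules string (apply_dragon_rules string)

-- ===== LEMMAS AND PROOFS =====
theorem pvAGo_eq_foldl (l : List Char) :
    pvAGo l = l.foldl
      (fun sentence c =>
        if c = 'a' then sentence ++ "aRbFR"
        else if c = 'b' then sentence ++ "LFaLb"
        else sentence ++ String.singleton c) "" := by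
  induction l using List.reverseRecOn with
  | nil => simp [pvAGo]
  | append_singleton l c ih =>
    rw [pvAGo]
    simp only [List.length_append, List.length_singleton, List.dropLast_concat,
      List.getLast_concat, List.foldl_append, List.foldl_cons, List.foldl_nil, ih]
    split
    · omega
    · rfl

-- ===== VERDICT (by name: the statement is the Claim_ definition above) =====
theorem apply_dragon_rules_spec : Claim_equal_apply_dragon_rules := by
  intro s _
  unfold Spec_apply_dragon_rules apply_dragon_rules apply_dragon_rules_alt
  exact pvAGo_eq_foldl s.toList
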